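-- pv_equiv track=rewrite | github.com/MrAbade/Auto-Roll-Call | auto_rollcall/utils/file_handler.py | orgainze_priority_on_sequence
-- ===== SOURCE A (Python) =====
-- from typing import Callable, Generator, Iterable, List, Union
--
-- def orgainze_priority_on_sequence(
--     module_import_name_list: Iterable[str],
--     priority_module_list: List[str],
-- ) -> List[str]:
--     return sorted(
--         module_import_name_list,
--         key=lambda value: any(
--             priority_module not in value
--             for priority_module in priority_module_list
--         ),
--     )
-- ===== SOURCE B (Python) =====
-- from typing import Iterable, List
--
-- def orgainze_priority_on_sequence(
--     module_import_name_list: Iterable[str],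
--     priority_module_list: List[str],
-- ) -> List[str]:
--     contains_all = []
--     others = []
--     for value in module_import_name_list:
--         if all(p in value for p in priority_module_list):
--             contains_all.append(value)
--         else:
--             others.append(value)
--     return contains_all + others
-- ===== Notes on version B (the rewrite author's own statement) =====
-- stated objective: simpler
-- what changed: Replaces the stable sort on a boolean key by a single-pass two-bucket stable partition (contains-all values kept in order, then the rest).
import Mathlib
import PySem

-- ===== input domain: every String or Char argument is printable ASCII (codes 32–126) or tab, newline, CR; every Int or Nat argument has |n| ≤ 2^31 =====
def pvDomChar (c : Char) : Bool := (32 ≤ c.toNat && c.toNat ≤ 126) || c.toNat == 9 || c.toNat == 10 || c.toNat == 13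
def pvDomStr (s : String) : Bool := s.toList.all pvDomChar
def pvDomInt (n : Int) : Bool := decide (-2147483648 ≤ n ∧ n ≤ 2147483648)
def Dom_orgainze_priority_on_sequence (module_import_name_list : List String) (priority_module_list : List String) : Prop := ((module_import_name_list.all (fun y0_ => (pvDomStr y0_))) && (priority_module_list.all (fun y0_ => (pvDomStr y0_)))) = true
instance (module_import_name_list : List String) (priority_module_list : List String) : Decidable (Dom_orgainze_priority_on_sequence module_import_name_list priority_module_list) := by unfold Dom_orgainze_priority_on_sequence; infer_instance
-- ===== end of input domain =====

-- B replaces A's boolean-key stable sort by a single-pass stable two-bucket partition (simpler).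


-- ===== PORT A =====
-- sorted(module_import_name_list, key=lambda value: any(pm not in value for pm in priority_module_list))
def orgainze_priority_on_sequence (module_import_name_list : List String) (priority_module_list : List String) : List String :=
  PySem.List.sorted module_import_name_list
    (fun value => priority_module_list.any (fun priority_module => !(PySem.Str.isIn priority_module value)))

-- ===== PORT B =====
-- single pass: bucket each value by "contains every priority module", return contains_all ++ others
def orgainze_priority_on_sequence_alt (module_import_name_list : List String) (priority_module_list : List String) : List String :=
  let r := module_import_name_list.foldl
    (fun (acc : List String × List String) value =>
      if priority_module_list.all (fun p => PySem.Str.isIn p value)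
      then (acc.1 ++ [value], acc.2)
      else (acc.1, acc.2 ++ [value]))
    ([], [])
  r.1 ++ r.2

-- ===== PRECONDITION & SPEC =====
def Spec_orgainze_priority_on_sequence (module_import_name_list : List String) (priority_module_list : List String) (out : List String) : Prop := out = orgainze_priority_on_sequence_alt module_import_name_list priority_module_list
instance (module_import_name_list : List String) (priority_module_list : List String) (out : List String) : Decidable (Spec_orgainze_priority_on_sequence module_import_name_list priority_module_list out) := by unfold Spec_orgainze_priority_on_sequence; infer_instance

-- ===== CLAIM (what is proved, stated in full; the proofs are below) =====
def Claim_equal_orgainze_priority_on_sequence : Prop := ∀ (module_import_name_list : List String) (priority_module_list : List String), Dom_orgainze_priority_on_sequence module_import_name_list priority_module_list → Spec_orgainze_priority_on_sequence module_import_name_list priority_module_list (orgainze_priority_on_sequence module_import_name_list priority_module_list)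

-- ===== LEMMAS AND PROOFS =====

-- inserting x between a false-prefix and a true-suffix lands exactly in the middle
theorem pv_insertBy_middle {α : Type} (before : α → α → Bool) (x : α) (F T : List α)
    (hF : ∀ y ∈ F, before x y = false) (hT : ∀ y ∈ T, before x y = true) :
    PySem.List.insertBy before x (F ++ T) = F ++ x :: T := by
  induction F with
  | nil =>
    cases T with
    | nil => simp [PySem.List.insertBy]
    | cons t ts => simp [PySem.List.insertBy, hT t (by simp)]
  | cons f fs ih =>
    simp [PySem.List.insertBy, hF f (by simp)]
    exact ih (fun y hy => hF y (by simp [hy]))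

-- A's insertion-sort fold with a Bool key is a stable partition
theorem pv_foldl_insert_partition {α : Type} (key : α → Bool) (xs F T : List α)
    (hF : ∀ y ∈ F, key y = false) (hT : ∀ y ∈ T, key y = true) :
    xs.foldl (fun acc x => PySem.List.insertBy (fun a b => decide (key a < key b)) x acc) (F ++ T)
      = (F ++ xs.filter (fun x => !key x)) ++ (T ++ xs.filter key) := by
  induction xs generalizing F T with
  | nil => simp
  | cons x xs ih =>
    by_cases hx : key x = true
    · have h1 : PySem.List.insertBy (fun a b => decide (key a < key b)) x (F ++ T)
          = F ++ (T ++ [x]) := by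
        rw [← List.append_assoc]
        exact PySem.List.insertBy_of_forall_not_before _ _ _
          (fun y _ => by simp [hx, Bool.lt_iff])
      have h2 := ih F (T ++ [x]) hF (by
        intro y hy; rcases List.mem_append.mp hy with h | h
        · exact hT y h
        · simp at h; simpa [h] using hx)
      simp only [List.foldl_cons, h1, h2]
      simp [hx]
    · have hx' : key x = false := by simpa using hx
      have h1 : PySem.List.insertBy (fun a b => decide (key a < key b)) x (F ++ T)
          = (F ++ [x]) ++ T := by
        rw [List.append_assoc]
        exact pv_insertBy_middle _ _ _ _
          (fun y hy => by simp [hx', hF y hy])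
          (fun y hy => by simp [hx', Bool.lt_iff, hT y hy])
      have h2 := ih (F ++ [x]) T (by
        intro y hy; rcases List.mem_append.mp hy with h | h
        · exact hF y h
        · simp at h; simpa [h] using hx') hT
      simp only [List.foldl_cons, h1, h2]
      simp [hx']


-- B's fold is a stable partition too
theorem pv_foldl_bucket {α : Type} (p : α → Bool) (xs a b : List α) :
    xs.foldl (fun (acc : List α × List α) v =>
        if p v then (acc.1 ++ [v], acc.2) else (acc.1, acc.2 ++ [v])) (a, b)
      = (a ++ xs.filter p, b ++ xs.filter (fun v => !p v)) := by
  induction xs generalizing a b with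
  | nil => simp
  | cons x xs ih =>
    by_cases hx : p x = true
    · simp [hx, ih]
    · have hx' : p x = false := by simpa using hx
      simp [hx', ih]

-- ===== VERDICT (by name: the statement is the Claim_ definition above) =====
theorem orgainze_priority_on_sequence_spec : Claim_equal_orgainze_priority_on_sequence := by
  intro m p _
  show orgainze_priority_on_sequence m p = orgainze_priority_on_sequence_alt m p
  unfold orgainze_priority_on_sequence orgainze_priority_on_sequence_alt
  rw [PySem.List.sorted_eq_foldl_insertBy]
  have hA := pv_foldl_insert_partition
    (fun value => p.any (fun pm => !(PySem.Str.isIn pm value))) m [] []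
    (by simp) (by simp)
  have hB := pv_foldl_bucket (fun value => p.all (fun q => PySem.Str.isIn q value)) m [] []
  simp only [List.nil_append, List.append_nil] at hA hB
  simp only [hA, hB]
  congr 1 <;> (apply List.filter_congr; intro x _; simp [List.all_eq_not_any_not])
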